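-- pv_equiv track=rewrite | github.com/lqtue/svelte-beta | work/ocr/scripts/ocr.py | group_tiles_by_row
-- ===== SOURCE A (Python) =====
-- def group_tiles_by_row(tiles, tile_size, overlap):
--     """Group tiles by y-band (same grid row). Returns list of rows, each a list of tiles sorted left→right."""
--     step = tile_size - overlap
--     rows: dict[int, list] = {}
--     for tile in tiles:
--         x, y, w, h = tile
--         row_idx = round(y / step) if step > 0 else 0
--         rows.setdefault(row_idx, []).append(tile)
--     return [sorted(row, key=lambda t: t[0]) for row in sorted(rows.values(), key=lambda r: r[0][1])]
-- ===== SOURCE B (Python) =====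
-- def group_tiles_by_row(tiles, tile_size, overlap):
--     """Group tiles by y-band (same grid row). Returns list of rows, each a list of tiles sorted left->right."""
--     step = tile_size - overlap
--     key = (lambda y: round(y / step)) if step > 0 else (lambda y: 0)
--     ks = sorted({key(t[1]) for t in tiles})
--     return [sorted([t for t in tiles if key(t[1]) == k], key=lambda t: t[0]) for k in ks]
-- ===== Notes on version B (the rewrite author's own statement) =====
-- stated objective: simpler
-- what changed: B drops A's dict-of-buckets and its sort of rows keyed by each bucket's first tile's y: it sorts the distinct row keys numerically once and emits, per key, the x-sorted filter of the tiles with that key.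
import Mathlib
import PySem

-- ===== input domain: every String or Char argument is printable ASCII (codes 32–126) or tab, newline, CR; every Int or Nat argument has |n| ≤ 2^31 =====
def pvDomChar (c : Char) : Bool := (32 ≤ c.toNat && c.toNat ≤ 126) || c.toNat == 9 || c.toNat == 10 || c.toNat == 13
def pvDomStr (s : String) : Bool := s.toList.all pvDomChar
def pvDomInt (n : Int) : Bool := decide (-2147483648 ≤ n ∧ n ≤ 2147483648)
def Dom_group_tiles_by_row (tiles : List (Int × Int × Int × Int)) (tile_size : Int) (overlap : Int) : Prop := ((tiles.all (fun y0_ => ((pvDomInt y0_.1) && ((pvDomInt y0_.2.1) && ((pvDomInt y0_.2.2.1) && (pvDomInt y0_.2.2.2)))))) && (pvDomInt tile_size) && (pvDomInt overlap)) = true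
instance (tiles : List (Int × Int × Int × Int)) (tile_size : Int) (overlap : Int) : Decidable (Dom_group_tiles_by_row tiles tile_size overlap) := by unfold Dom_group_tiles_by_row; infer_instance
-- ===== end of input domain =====

-- B replaces A's dict-bucketing plus sort-of-rows-by-first-tile-y with numerically sorted
-- distinct row keys and one filter per key; objective: simpler (no dict, no re-derivation
-- of a row's order from its first bucket entry).

-- ===== PORT A =====
-- Python's round(y / step) for integers y and 0 < step: the float quotient is rounded
-- half-to-even.  On the stated domain (|y| ≤ 2^31, 0 < step ≤ 2^32) the float rounding error
-- of y/step (≤ |y|/step · 2⁻⁵³) is smaller than the distance from y/step to any half-integer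
-- it does not equal (≥ 1/(2·step)), and exact half-integers of this magnitude are exact
-- doubles, so round(y/step) equals exact half-to-even rounding of the rational y/step,
-- which this computes on integers.
def pvRoundDiv (y s : Int) : Int :=
  let q := PySem.Int.floordiv y s
  let r := PySem.Int.mod y s
  if 2 * r < s then q else if s < 2 * r then q + 1 else if q % 2 = 0 then q else q + 1

-- the expression 'round(y / step) if step > 0 else 0' appearing in both programs
def pvRowKey (step y : Int) : Int := if 0 < step then pvRoundDiv y step else 0

def group_tiles_by_row (tiles : List (Int × Int × Int × Int)) (tile_size : Int) (overlap : Int) : List (List (Int × Int × Int × Int)) :=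
  let step := tile_size - overlap
  -- rows.setdefault(row_idx, []).append(tile)  ==  modify row_idx [] (· ++ [tile])
  let rows : PySem.Dict Int (List (Int × Int × Int × Int)) :=
    tiles.foldl (fun d tile => d.modify (pvRowKey step tile.2.1) [] (fun row => row ++ [tile])) PySem.Dict.empty
  -- key r[0][1]: every bucket is nonempty, so Python's r[0] never raises; the [] arm is unreachable
  (PySem.List.sorted rows.values (fun r => match r with | t :: _ => t.2.1 | [] => 0)).map
    (fun row => PySem.List.sorted row (fun t => t.1))

-- ===== PORT B =====
def group_tiles_by_row_alt (tiles : List (Int × Int × Int × Int)) (tile_size : Int) (overlap : Int) : List (List (Int × Int × Int × Int)) :=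
  let step := tile_size - overlap
  let ks := PySem.List.sorted (PySem.Set.ofList (tiles.map (fun t => pvRowKey step t.2.1))) (fun k => k)
  ks.map (fun k => PySem.List.sorted (tiles.filter (fun t => pvRowKey step t.2.1 == k)) (fun t => t.1))

-- ===== PRECONDITION & SPEC =====
def Spec_group_tiles_by_row (tiles : List (Int × Int × Int × Int)) (tile_size : Int) (overlap : Int) (out : List (List (Int × Int × Int × Int))) : Prop := out = group_tiles_by_row_alt tiles tile_size overlap
instance (tiles : List (Int × Int × Int × Int)) (tile_size : Int) (overlap : Int) (out : List (List (Int × Int × Int × Int))) : Decidable (Spec_group_tiles_by_row tiles tile_size overlap out) := by unfold Spec_group_tiles_by_row; infer_instance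

-- ===== CLAIM (what is proved, stated in full; the proofs are below) =====
def Claim_equal_group_tiles_by_row : Prop := ∀ (tiles : List (Int × Int × Int × Int)) (tile_size : Int) (overlap : Int), Dom_group_tiles_by_row tiles tile_size overlap → Spec_group_tiles_by_row tiles tile_size overlap (group_tiles_by_row tiles tile_size overlap)

-- ===== LEMMAS AND PROOFS =====

-- half-to-even rounding of y/s is monotone in y (for a fixed positive s)
lemma pvRoundDiv_mono (s y y' : Int) (hs : 0 < s) (h : y ≤ y') : pvRoundDiv y s ≤ pvRoundDiv y' s := by
  unfold pvRoundDiv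
  have hq : PySem.Int.floordiv y s ≤ PySem.Int.floordiv y' s := by
    rw [PySem.Int.floordiv_eq_ediv_of_pos hs, PySem.Int.floordiv_eq_ediv_of_pos hs]
    exact Int.ediv_le_ediv hs h
  rcases lt_or_eq_of_le hq with hlt | heq
  · simp only []
    split_ifs <;> omega
  · have e1 := PySem.Int.floordiv_mul_add_mod y s
    have e2 := PySem.Int.floordiv_mul_add_mod y' s
    rw [heq] at e1
    have hr : PySem.Int.mod y s ≤ PySem.Int.mod y' s := by omega
    simp only [heq]
    split_ifs <;> omega

lemma pvRowKey_mono (step y y' : Int) (h : y ≤ y') : pvRowKey step y ≤ pvRowKey step y' := by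
  unfold pvRowKey
  split_ifs with hstep
  · exact pvRoundDiv_mono step y y' hstep h
  · exact le_refl 0

-- A's dict after the loop: the bucket of a key c is the sublist of tiles with row key c
lemma rows_getD (tiles : List (Int × Int × Int × Int)) (step : Int) (c : Int) :
    (tiles.foldl (fun d tile => d.modify (pvRowKey step tile.2.1) [] (fun row => row ++ [tile]))
      (PySem.Dict.empty : PySem.Dict Int (List (Int × Int × Int × Int)))).getD c []
    = tiles.filter (fun t => pvRowKey step t.2.1 == c) := by
  have hfold : tiles.foldl (fun d tile => d.modify (pvRowKey step tile.2.1) [] (fun row => row ++ [tile]))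
      (PySem.Dict.empty : PySem.Dict Int (List (Int × Int × Int × Int)))
      = (tiles.map (fun t => (pvRowKey step t.2.1, t))).foldl
          (fun d p => d.modify p.1 [] (fun row => row ++ [p.2])) PySem.Dict.empty := by
    rw [List.foldl_map]
  rw [hfold, PySem.Dict.getD_foldl_modify_append]
  simp [List.filter_map, Function.comp_def]

-- A's dict keys: the distinct row keys in first-occurrence order
lemma rows_keys (tiles : List (Int × Int × Int × Int)) (step : Int) :
    (tiles.foldl (fun d tile => d.modify (pvRowKey step tile.2.1) [] (fun row => row ++ [tile]))
      (PySem.Dict.empty : PySem.Dict Int (List (Int × Int × Int × Int)))).keys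
    = PySem.Set.ofList (tiles.map (fun t => pvRowKey step t.2.1)) := by
  rw [PySem.Dict.keys_foldl_modify_key tiles (fun t => pvRowKey step t.2.1) []
        (fun _ tile => (fun row => row ++ [tile]))]
  simp [PySem.Set.update_nil_left]

-- every distinct row key's bucket starts with a tile carrying that key
lemma bucket_head (tiles : List (Int × Int × Int × Int)) (step : Int) (k : Int)
    (hk : k ∈ PySem.Set.ofList (tiles.map (fun t => pvRowKey step t.2.1))) :
    ∃ h tl, tiles.filter (fun t => pvRowKey step t.2.1 == k) = h :: tl ∧ pvRowKey step h.2.1 = k := by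
  rw [PySem.Set.mem_ofList, List.mem_map] at hk
  obtain ⟨t, ht, hkt⟩ := hk
  have htf : t ∈ tiles.filter (fun t => pvRowKey step t.2.1 == k) :=
    List.mem_filter.mpr ⟨ht, by simp [hkt]⟩
  cases hfil : tiles.filter (fun t => pvRowKey step t.2.1 == k) with
  | nil => rw [hfil] at htf; simp at htf
  | cons h tl =>
    refine ⟨h, tl, rfl, ?_⟩
    have : h ∈ tiles.filter (fun t => pvRowKey step t.2.1 == k) := by rw [hfil]; exact List.mem_cons_self
    have := List.mem_filter.mp this
    simpa using this.2

-- the core identity, for an arbitrary step: A's row list equals B's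
lemma group_eq (tiles : List (Int × Int × Int × Int)) (step : Int) :
    (PySem.List.sorted
        ((tiles.foldl (fun d tile => d.modify (pvRowKey step tile.2.1) [] (fun row => row ++ [tile]))
          (PySem.Dict.empty : PySem.Dict Int (List (Int × Int × Int × Int)))).values)
        (fun r => match r with | t :: _ => t.2.1 | [] => 0)).map
      (fun row => PySem.List.sorted row (fun t => t.1))
    = (PySem.List.sorted (PySem.Set.ofList (tiles.map (fun t => pvRowKey step t.2.1))) (fun k => k)).map
        (fun k => PySem.List.sorted (tiles.filter (fun t => pvRowKey step t.2.1 == k)) (fun t => t.1)) := by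
  have hnodup : (tiles.foldl (fun d tile => d.modify (pvRowKey step tile.2.1) [] (fun row => row ++ [tile]))
      (PySem.Dict.empty : PySem.Dict Int (List (Int × Int × Int × Int)))).keys.Nodup := by
    rw [rows_keys]; exact PySem.Set.nodup_ofList _
  have hvals : (tiles.foldl (fun d tile => d.modify (pvRowKey step tile.2.1) [] (fun row => row ++ [tile]))
      (PySem.Dict.empty : PySem.Dict Int (List (Int × Int × Int × Int)))).values
      = (PySem.Set.ofList (tiles.map (fun t => pvRowKey step t.2.1))).map
          (fun k => tiles.filter (fun t => pvRowKey step t.2.1 == k)) := by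
    rw [PySem.Dict.values_eq_map_keys _ hnodup [], rows_keys]
    simp only [rows_getD]
  rw [hvals]
  have hperm : ((PySem.List.sorted (PySem.Set.ofList (tiles.map (fun t => pvRowKey step t.2.1))) (fun k => k)).map
        (fun k => tiles.filter (fun t => pvRowKey step t.2.1 == k))).Perm
      ((PySem.Set.ofList (tiles.map (fun t => pvRowKey step t.2.1))).map
        (fun k => tiles.filter (fun t => pvRowKey step t.2.1 == k))) :=
    (PySem.List.sorted_perm _ _ _).map _
  have hsortedK_lt : (PySem.List.sorted (PySem.Set.ofList (tiles.map (fun t => pvRowKey step t.2.1))) (fun k => k)).Pairwise (· < ·) := by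
    have hle := PySem.List.sorted_pairwise (PySem.Set.ofList (tiles.map (fun t => pvRowKey step t.2.1))) (fun k => k)
    have hnd : (PySem.List.sorted (PySem.Set.ofList (tiles.map (fun t => pvRowKey step t.2.1))) (fun k => k)).Nodup :=
      (PySem.List.sorted_perm _ _ _).nodup_iff.mpr (PySem.Set.nodup_ofList _)
    exact (hle.and hnd).imp (fun h => lt_of_le_of_ne h.1 h.2)
  have hpair : List.Pairwise
      (fun r r' => (fun r => match r with | t :: _ => t.2.1 | [] => (0:Int)) r < (fun r => match r with | t :: _ => t.2.1 | [] => 0) r')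
      ((PySem.List.sorted (PySem.Set.ofList (tiles.map (fun t => pvRowKey step t.2.1))) (fun k => k)).map
        (fun k => tiles.filter (fun t => pvRowKey step t.2.1 == k))) := by
    rw [List.pairwise_map]
    refine hsortedK_lt.imp_of_mem ?_
    intro a b ha hb hab
    have haK : a ∈ PySem.Set.ofList (tiles.map (fun t => pvRowKey step t.2.1)) :=
      (PySem.List.sorted_perm _ _ _).mem_iff.mp ha
    have hbK : b ∈ PySem.Set.ofList (tiles.map (fun t => pvRowKey step t.2.1)) :=
      (PySem.List.sorted_perm _ _ _).mem_iff.mp hb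
    obtain ⟨h1, tl1, he1, hk1⟩ := bucket_head tiles step a haK
    obtain ⟨h2, tl2, he2, hk2⟩ := bucket_head tiles step b hbK
    rw [he1, he2]
    simp only []
    by_contra hnot
    push Not at hnot
    have := pvRowKey_mono step h2.2.1 h1.2.1 hnot
    omega
  have hkey : PySem.List.sorted
      ((PySem.Set.ofList (tiles.map (fun t => pvRowKey step t.2.1))).map
        (fun k => tiles.filter (fun t => pvRowKey step t.2.1 == k)))
      (fun r => match r with | t :: _ => t.2.1 | [] => 0)
      = (PySem.List.sorted (PySem.Set.ofList (tiles.map (fun t => pvRowKey step t.2.1))) (fun k => k)).map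
        (fun k => tiles.filter (fun t => pvRowKey step t.2.1 == k)) :=
    PySem.List.sorted_eq_of_perm_of_pairwise_lt _ _ _ hperm hpair
  rw [hkey, List.map_map]
  simp [Function.comp_def]

-- ===== VERDICT (by name: the statement is the Claim_ definition above) =====
theorem group_tiles_by_row_spec : Claim_equal_group_tiles_by_row := by
  intro tiles tile_size overlap _
  unfold Spec_group_tiles_by_row group_tiles_by_row group_tiles_by_row_alt
  exact group_eq tiles (tile_size - overlap)
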